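-- pv_equiv track=rewrite | github.com/MrBrantCode/unitest_baseline | mut_generate/mist_train_cf/cf_89298/solution.py | sum_unique_primes
-- ===== SOURCE A (Python) =====
-- import math
--
-- def sum_unique_primes(lst):
--     primes = set()
--     total_sum = 0
--     for num in lst:
--         if num < 2:
--             continue
--         is_prime = True
--         for i in range(2, int(math.sqrt(num)) + 1):
--             if num % i == 0:
--                 is_prime = False
--                 break
--         if is_prime and num not in primes:
--             primes.add(num)
--             total_sum += num
--     return total_sum
-- ===== SOURCE B (Python) =====
-- import math
--
-- def sum_unique_primes(lst):
--     vals = {x for x in lst if x >= 2}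
--     if not vals:
--         return 0
--     limit = math.isqrt(max(vals))
--     sieve = [True] * (limit + 1)
--     small_primes = []
--     for p in range(2, limit + 1):
--         if sieve[p]:
--             small_primes.append(p)
--             for m in range(p * p, limit + 1, p):
--                 sieve[m] = False
--     return sum(v for v in vals
--                if all(v % p for p in small_primes if p * p <= v))
-- ===== Notes on version B (the rewrite author's own statement) =====
-- stated objective: faster
-- what changed: B sieves the primes up to isqrt(max) once with a sieve of Eratosthenes and then tests each distinct value by dividing only by those sieved primes, instead of A's per-element trial division by every integer in range(2, sqrt(num)+1) interleaved with a running seen-set.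
import Mathlib
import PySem

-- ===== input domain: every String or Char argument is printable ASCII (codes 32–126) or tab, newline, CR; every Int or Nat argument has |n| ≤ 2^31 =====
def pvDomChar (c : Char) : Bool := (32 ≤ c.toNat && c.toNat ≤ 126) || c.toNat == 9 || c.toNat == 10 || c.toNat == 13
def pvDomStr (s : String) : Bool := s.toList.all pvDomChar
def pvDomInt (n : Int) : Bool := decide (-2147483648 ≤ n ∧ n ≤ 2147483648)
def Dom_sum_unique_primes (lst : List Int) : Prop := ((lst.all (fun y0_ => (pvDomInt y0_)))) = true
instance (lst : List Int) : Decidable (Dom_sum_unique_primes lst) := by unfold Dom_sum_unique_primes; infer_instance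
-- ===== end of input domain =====

-- B replaces A's per-element range(2, sqrt(num)+1) trial division with a sieve of Eratosthenes up to
-- isqrt(max) computed once, then tests each distinct value by dividing only by the sieved primes.

-- ===== PORT A =====
-- inner 'for i in range(2, int(math.sqrt(num)) + 1): if num % i == 0: … break' loop
def pvTrialA (num : Int) : List Int → Bool
  | [] => true
  | i :: rest => if PySem.Int.mod num i == 0 then false else pvTrialA num rest

-- int(math.sqrt(num)) ported as Nat.sqrt: exact for 0 ≤ num ≤ 2^31 (double sqrt rounds to isqrt there)
def pvIsPrimeA (num : Int) : Bool :=
  pvTrialA num (PySem.List.pyRange 2 ((Nat.sqrt num.toNat : Int) + 1) 1)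

-- one iteration of A's 'for num in lst' loop over the state (primes, total_sum)
def pvStepA (st : PySem.Set Int × Int) (num : Int) : PySem.Set Int × Int :=
  if num < 2 then st
  else if pvIsPrimeA num && !(PySem.Set.contains st.1 num) then
    (PySem.Set.add st.1 num, st.2 + num)
  else st

def sum_unique_primes (lst : List Int) : Int :=
  (lst.foldl pvStepA (PySem.Set.empty, 0)).2

-- ===== PORT B =====
-- one iteration of the sieve loop 'for p in range(2, limit+1)' over (sieve, small_primes);
-- sieve[p] and sieve[m] = False are in range (2 ≤ p ≤ limit, p*p ≤ m ≤ limit, len = limit+1),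
-- so pyGetD / List.set (index m ≥ 4, hence .toNat is exact) port them exactly.
def pvSieveStep (limit : Int) (st : List Bool × List Int) (p : Int) : List Bool × List Int :=
  if PySem.List.pyGetD st.1 p false then
    ((PySem.List.pyRange (p * p) (limit + 1) p).foldl (fun s m => s.set m.toNat false) st.1,
     st.2 ++ [p])
  else st

-- the whole sieve: '[True]*(limit+1)' then the loop; returns small_primes
def pvSmallPrimes (limit : Int) : List Int :=
  ((PySem.List.pyRange 2 (limit + 1) 1).foldl (pvSieveStep limit)
    (List.replicate (limit + 1).toNat true, [])).2

-- 'all(v % p for p in small_primes if p * p <= v)'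
def pvTestB (small : List Int) (v : Int) : Bool :=
  (small.filter (fun p => decide (p * p ≤ v))).all (fun p => !(PySem.Int.mod v p == 0))

-- math.isqrt ported as Nat.sqrt (exact)
def sum_unique_primes_alt (lst : List Int) : Int :=
  let vals := PySem.Set.ofList (lst.filter (fun x => decide (2 ≤ x)))
  match PySem.List.max? vals (fun y => y) with
  | none => 0
  | some mx =>
    let small := pvSmallPrimes ((Nat.sqrt mx.toNat : Int))
    (vals.filter (fun v => pvTestB small v)).sum

-- ===== PRECONDITION & SPEC =====
def Spec_sum_unique_primes (lst : List Int) (out : Int) : Prop := out = sum_unique_primes_alt lst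
instance (lst : List Int) (out : Int) : Decidable (Spec_sum_unique_primes lst out) := by unfold Spec_sum_unique_primes; infer_instance

-- ===== CLAIM (what is proved, stated in full; the proofs are below) =====
def Claim_equal_sum_unique_primes : Prop := ∀ (lst : List Int), Dom_sum_unique_primes lst → Spec_sum_unique_primes lst (sum_unique_primes lst)

-- ===== LEMMAS AND PROOFS =====

-- A's per-element test, combined with its 'num < 2: continue' guard
def pvGood (x : Int) : Bool := !(x < 2) && pvIsPrimeA x

-- "n has no divisor m with 2 ≤ m ≤ √n" — the characterisation both tests decide
def pvNoSmallDiv (n : Int) : Prop := ∀ m : Int, 2 ≤ m → m * m ≤ n → ¬ m ∣ n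

lemma pvTrialA_iff (num : Int) (l : List Int) :
    pvTrialA num l = true ↔ ∀ i ∈ l, PySem.Int.mod num i ≠ 0 := by
  induction l with
  | nil => simp [pvTrialA]
  | cons i rest ih =>
    by_cases h : PySem.Int.mod num i == 0 <;> simp_all [pvTrialA]

lemma pv_sq_le_iff_le_sqrt (m n : Int) (hm : 0 ≤ m) (hn : 0 ≤ n) :
    m * m ≤ n ↔ m ≤ (Nat.sqrt n.toNat : Int) := by
  constructor
  · intro h
    have h' : m.toNat * m.toNat ≤ n.toNat := by
      zify; rw [Int.toNat_of_nonneg hm, Int.toNat_of_nonneg hn]; exact h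
    have := Nat.le_sqrt.mpr h'
    omega
  · intro h
    have h' : m.toNat ≤ Nat.sqrt n.toNat := by omega
    have h2 := Nat.le_sqrt.mp h'
    zify at h2; rw [Int.toNat_of_nonneg hm, Int.toNat_of_nonneg hn] at h2; exact h2

lemma pvIsPrimeA_iff (n : Int) (hn : 2 ≤ n) : pvIsPrimeA n = true ↔ pvNoSmallDiv n := by
  rw [pvIsPrimeA, pvTrialA_iff]
  constructor
  · intro h m h2 hmm hdvd
    have hmem : m ∈ PySem.List.pyRange 2 ((Nat.sqrt n.toNat : Int) + 1) 1 := by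
      rw [PySem.List.mem_pyRange_one]
      have := (pv_sq_le_iff_le_sqrt m n (by omega) (by omega)).mp hmm
      omega
    exact h m hmem ((PySem.Int.mod_eq_zero_iff_dvd n m).mpr hdvd)
  · intro h i hi
    rw [PySem.List.mem_pyRange_one] at hi
    have hii : i * i ≤ n :=
      (pv_sq_le_iff_le_sqrt i n (by omega) (by omega)).mpr (by omega)
    intro hmod
    exact h i hi.1 hii ((PySem.Int.mod_eq_zero_iff_dvd n i).mp hmod)

-- ---------- the sieve: what we need of it ----------

-- marking multiples never changes length
lemma pvMark_length (ms : List Int) (s : List Bool) :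
    (ms.foldl (fun s m => s.set m.toNat false) s).length = s.length := by
  induction ms generalizing s with
  | nil => rfl
  | cons m rest ih => simp [List.foldl_cons, ih]

-- marking multiples leaves every other index unchanged
lemma pvMark_getD_ne (ms : List Int) (i : Nat) (h : ∀ m ∈ ms, m.toNat ≠ i) (s : List Bool) :
    (ms.foldl (fun s m => s.set m.toNat false) s).getD i false = s.getD i false := by
  induction ms generalizing s with
  | nil => rfl
  | cons m rest ih =>
    simp only [List.foldl_cons]
    rw [ih (fun m hm => h m (List.mem_cons_of_mem _ hm))]
    unfold List.getD
    rw [List.getElem?_set_ne (h m (List.mem_cons_self))]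

-- a marked cell p*p + p*j is composite, so its index is never a prime
lemma pvPrime_not_marked (q : Nat) (hq : Nat.Prime q) (p m : Int) (hp : 2 ≤ p)
    (h1 : p * p ≤ m) (hdvd : p ∣ m - p * p) : m.toNat ≠ q := by
  obtain ⟨j, hj⟩ := hdvd
  have hj0 : 0 ≤ j := by nlinarith
  have hm' : m = p * (p + j) := by linear_combination hj
  intro hq'
  have hmq : (q : Int) = p * (p + j) := by
    have h0 : (0 : Int) ≤ m := by nlinarith
    have hqm : (q : Int) = m := by omega
    rw [hqm, hm']
  have hnat : q = p.toNat * (p + j).toNat := by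
    have h : ((p.toNat * (p + j).toNat : Nat) : Int) = (q : Int) := by
      push_cast
      rw [Int.toNat_of_nonneg (by omega), Int.toNat_of_nonneg (by omega)]
      omega
    exact_mod_cast h.symm
  rcases hq.eq_one_or_self_of_dvd p.toNat ⟨(p + j).toNat, hnat⟩ with h | h
  · omega
  · have h2 := hq.two_le
    have hk2 : 2 ≤ (p + j).toNat := by omega
    rw [h] at hnat
    nlinarith

-- the sieve-loop invariant, and the two facts we extract from it
def pvSieveInv (limit a : Int) (st : List Bool × List Int) : Prop :=
  st.1.length = (limit + 1).toNat ∧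
  (∀ q : Nat, Nat.Prime q → (q : Int) ≤ limit → st.1.getD q false = true) ∧
  (∀ p ∈ st.2, 2 ≤ p ∧ p ≤ limit) ∧
  (∀ q : Nat, Nat.Prime q → (q : Int) < a → (q : Int) ≤ limit → (q : Int) ∈ st.2)

lemma pvSieveStep_inv (limit a : Int) (st : List Bool × List Int)
    (ha : 2 ≤ a) (ha2 : a ≤ limit) (h : pvSieveInv limit a st) :
    pvSieveInv limit (a + 1) (pvSieveStep limit st a) := by
  obtain ⟨hlen, hpr, hel, hcomp⟩ := h
  unfold pvSieveStep
  by_cases hg : PySem.List.pyGetD st.1 a false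
  · rw [if_pos hg]
    have hmark : ∀ q : Nat, Nat.Prime q → (q : Int) ≤ limit →
        ((PySem.List.pyRange (a * a) (limit + 1) a).foldl
          (fun s m => s.set m.toNat false) st.1).getD q false = true := by
      intro q hq hql
      rw [pvMark_getD_ne]
      · exact hpr q hq hql
      · intro m hm
        rw [PySem.List.mem_pyRange_iff_of_pos (by omega)] at hm
        exact pvPrime_not_marked q hq a m ha hm.1 hm.2.2
    refine ⟨by rw [pvMark_length]; exact hlen, hmark, ?_, ?_⟩
    · intro p hp
      rcases List.mem_append.mp hp with h' | h'
      · exact hel p h'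
      · simp only [List.mem_singleton] at h'; omega
    · intro q hq hqa hql
      by_cases hqa' : (q : Int) < a
      · exact List.mem_append_left _ (hcomp q hq hqa' hql)
      · have : (q : Int) = a := by omega
        exact List.mem_append_right _ (by simp [this])
  · rw [if_neg hg]
    refine ⟨hlen, hpr, hel, ?_⟩
    intro q hq hqa hql
    by_cases hqa' : (q : Int) < a
    · exact hcomp q hq hqa' hql
    · exfalso
      have hqe : (q : Int) = a := by omega
      apply hg
      rw [PySem.List.pyGetD_of_nonneg _ _ (by omega)]
      have := hpr q hq hql
      rw [show a.toNat = q by omega]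
      exact this

lemma pvSieveFold_inv (limit : Int) : ∀ (a : Int) (st : List Bool × List Int),
    2 ≤ a → pvSieveInv limit a st →
    pvSieveInv limit (limit + 1) ((PySem.List.pyRange a (limit + 1) 1).foldl (pvSieveStep limit) st) := by
  intro a
  by_cases h : a ≤ limit
  · have hlt : (limit + 1 - a).toNat < (limit + 1 - a).toNat + 1 := by omega
    intro st ha hinv
    rw [PySem.List.pyRange_one_cons (by omega), List.foldl_cons]
    exact pvSieveFold_inv limit (a + 1) _ (by omega) (pvSieveStep_inv limit a st ha h hinv)
  · intro st ha hinv
    rw [PySem.List.pyRange_one_eq_nil (by omega)]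
    simp only [List.foldl_nil]
    obtain ⟨h1, h2, h3, h4⟩ := hinv
    exact ⟨h1, h2, h3, fun q hq hqa hql => h4 q hq (by omega) hql⟩
termination_by a => (limit + 1 - a).toNat

-- every element of small_primes is in [2, limit]; every prime ≤ limit is an element
lemma pvSmallPrimes_spec (limit : Int) :
    (∀ p ∈ pvSmallPrimes limit, 2 ≤ p ∧ p ≤ limit) ∧
    (∀ q : Nat, Nat.Prime q → (q : Int) ≤ limit → (q : Int) ∈ pvSmallPrimes limit) := by
  have hinit : pvSieveInv limit 2 (List.replicate (limit + 1).toNat true, []) := by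
    refine ⟨by simp, ?_, by simp, by intro q hq h1 h2; exfalso; have := hq.two_le; omega⟩
    intro q hq hql
    have h2 := hq.two_le
    have hlt : q < (limit + 1).toNat := by omega
    simp [List.getD, hlt]
  have := pvSieveFold_inv limit 2 _ (by omega) hinit
  obtain ⟨_, _, h3, h4⟩ := this
  exact ⟨h3, fun q hq hql => h4 q hq (by omega) hql⟩

-- ---------- B's test equals A's test on [2, mx] ----------

lemma pvTestB_eq_isPrimeA (mx v : Int) (hmx2 : 2 ≤ mx) (hv : 2 ≤ v) (hvm : v ≤ mx) :
    pvTestB (pvSmallPrimes ((Nat.sqrt mx.toNat : Int))) v = pvIsPrimeA v := by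
  set limit : Int := (Nat.sqrt mx.toNat : Int) with hlim
  obtain ⟨hsound, hcomp⟩ := pvSmallPrimes_spec limit
  have htest : pvTestB (pvSmallPrimes limit) v = true ↔
      ∀ p ∈ pvSmallPrimes limit, p * p ≤ v → ¬ p ∣ v := by
    unfold pvTestB
    simp only [List.all_eq_true, List.mem_filter, decide_eq_true_eq, Bool.not_eq_eq_eq_not,
      Bool.not_true, beq_eq_false_iff_ne, ne_eq, and_imp]
    constructor
    · intro h p hp hpv hdvd
      exact h p hp hpv ((PySem.Int.mod_eq_zero_iff_dvd v p).mpr hdvd)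
    · intro h p hp hpv hmod
      exact h p hp hpv ((PySem.Int.mod_eq_zero_iff_dvd v p).mp hmod)
  have hchar : pvTestB (pvSmallPrimes limit) v = true ↔ pvNoSmallDiv v := by
    rw [htest]
    constructor
    · intro h m hm2 hmm hdvd
      -- v has the small divisor m; its least prime factor is a sieved prime that divides v
      set n := v.toNat with hn
      have hn2 : 2 ≤ n := by omega
      have hq : Nat.Prime n.minFac := Nat.minFac_prime (by omega)
      have hqm : n.minFac ≤ m.toNat := by
        apply Nat.minFac_le_of_dvd (by omega)
        have : m.toNat ∣ n := by
          obtain ⟨c, hc⟩ := hdvd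
          exact ⟨c.toNat, by nlinarith [Int.toNat_of_nonneg (by omega : (0:Int) ≤ v),
            Int.toNat_of_nonneg (by omega : (0:Int) ≤ m),
            Int.toNat_of_nonneg (by nlinarith : (0:Int) ≤ c)]⟩
        exact this
      have hml : m ≤ limit := by
        rw [hlim]
        exact (pv_sq_le_iff_le_sqrt m mx (by omega) (by omega)).mp (by nlinarith)
      have hmem : ((n.minFac : Nat) : Int) ∈ pvSmallPrimes limit :=
        hcomp n.minFac hq (by omega)
      have hdvdv : ((n.minFac : Nat) : Int) ∣ v := by
        obtain ⟨c, hc⟩ := Nat.minFac_dvd n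
        have hcast : ((n.minFac * c : Nat) : Int) = v := by rw [← hc]; omega
        push_cast at hcast
        exact ⟨(c : Int), hcast.symm⟩
      have hq2 := hq.two_le
      have hqi : ((n.minFac : Nat) : Int) ≤ m := by omega
      have hsq : ((n.minFac : Nat) : Int) * ((n.minFac : Nat) : Int) ≤ v := by nlinarith
      exact h _ hmem hsq hdvdv
    · intro h p hp hpv
      exact h p (hsound p hp).1 hpv
  by_cases hns : pvNoSmallDiv v
  · rw [hchar.mpr hns, (pvIsPrimeA_iff v hv).mpr hns]
  · rcases Bool.eq_false_or_eq_true (pvTestB (pvSmallPrimes limit) v) with h1 | h1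
    · exact absurd (hchar.mp h1) hns
    · rcases Bool.eq_false_or_eq_true (pvIsPrimeA v) with h2 | h2
      · exact absurd ((pvIsPrimeA_iff v hv).mp h2) hns
      · rw [h1, h2]

-- ---------- A's fold is the filtered sum over the distinct elements ----------

lemma pvGood_lt (x : Int) (h : x < 2) : pvGood x = false := by
  simp [pvGood, h]

lemma pvFold_main (xs : List Int) : ∀ (sa sb : PySem.Set Int) (t : Int),
    (∀ y, pvGood y = true → (y ∈ sa ↔ y ∈ sb)) →
    (xs.foldl pvStepA (sa, t)).2
      = t + ((xs.foldl PySem.Set.add sb).filter (fun x => pvGood x)).sum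
          - (sb.filter (fun x => pvGood x)).sum := by
  induction xs with
  | nil => intro sa sb t _; simp
  | cons x xs ih =>
    intro sa sb t hrel
    simp only [List.foldl_cons]
    by_cases hpB : pvGood x = true
    · have hx2 : ¬ x < 2 := by
        by_contra hlt
        rw [pvGood_lt x (by omega)] at hpB; simp at hpB
      have hpA : pvIsPrimeA x = true := by
        have := hpB; unfold pvGood at this; simp_all
      by_cases hmem : x ∈ sa
      · have hmb : x ∈ sb := (hrel x hpB).mp hmem
        have hstep : pvStepA (sa, t) x = (sa, t) := by
          simp [pvStepA, hx2, PySem.Set.contains, hmem]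
        have hadd : PySem.Set.add sb x = sb := by
          simp [PySem.Set.add, PySem.Set.contains, hmb]
        rw [hstep, hadd]; exact ih sa sb t hrel
      · have hmb : x ∉ sb := fun h => hmem ((hrel x hpB).mpr h)
        have hstep : pvStepA (sa, t) x = (PySem.Set.add sa x, t + x) := by
          simp [pvStepA, hx2, hpA, PySem.Set.contains, hmem]
        have hadd : PySem.Set.add sb x = sb ++ [x] := by
          simp [PySem.Set.add, PySem.Set.contains, hmb]
        have hrel' : ∀ y, pvGood y = true →
            (y ∈ PySem.Set.add sa x ↔ y ∈ sb ++ [x]) := by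
          intro y hy
          rw [PySem.Set.mem_add]
          simp [hrel y hy]
        rw [hstep, hadd, ih _ _ _ hrel']
        simp [List.filter_append, hpB]
        ring
    · have hstep : pvStepA (sa, t) x = (sa, t) := by
        by_cases hx2 : x < 2
        · simp [pvStepA, hx2]
        · have : pvIsPrimeA x = false := by
            unfold pvGood at hpB; simp_all
          simp [pvStepA, hx2, this]
      have hrel' : ∀ y, pvGood y = true → (y ∈ sa ↔ y ∈ PySem.Set.add sb x) := by
        intro y hy
        have hyx : y ≠ x := fun h => hpB (h ▸ hy)
        rw [PySem.Set.mem_add, hrel y hy]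
        simp [hyx]
      rw [hstep, ih _ _ _ hrel']
      have : ((PySem.Set.add sb x).filter (fun z => pvGood z)).sum
          = (sb.filter (fun z => pvGood z)).sum := by
        by_cases hmb : x ∈ sb
        · simp [PySem.Set.add, PySem.Set.contains, hmb]
        · simp [PySem.Set.add, PySem.Set.contains, hmb, List.filter_append, hpB]
      rw [this]

lemma pvA_as_filter_sum (lst : List Int) :
    sum_unique_primes lst = ((PySem.Set.ofList lst).filter (fun x => pvGood x)).sum := by
  rw [sum_unique_primes, PySem.Set.ofList_eq_foldl]
  rw [pvFold_main lst PySem.Set.empty [] 0 (fun _ _ => Iff.rfl)]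
  simp

-- ---------- set(filtered list) = filter of set(list) ----------

lemma pvOfList_filter (q : Int → Bool) (l : List Int) :
    PySem.Set.ofList (l.filter q) = (PySem.Set.ofList l).filter q := by
  induction l using List.reverseRecOn with
  | nil => rfl
  | append_singleton l x ih =>
    rw [List.filter_append, PySem.Set.ofList_append_singleton]
    by_cases hq : q x
    · rw [show List.filter q [x] = [x] by simp [hq], PySem.Set.ofList_append_singleton, ih,
        PySem.Set.add_eq_ite, PySem.Set.add_eq_ite]
      by_cases hx : x ∈ PySem.Set.ofList l
      · rw [if_pos (by rw [List.mem_filter]; exact ⟨hx, hq⟩), if_pos hx]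
      · rw [if_neg (by rw [List.mem_filter]; exact fun h => hx h.1), if_neg hx, List.filter_append]
        simp [hq]
    · rw [show List.filter q [x] = ([] : List Int) by simp [hq], List.append_nil, ih,
        PySem.Set.add_eq_ite]
      by_cases hx : x ∈ PySem.Set.ofList l
      · rw [if_pos hx]
      · rw [if_neg hx, List.filter_append]
        simp [hq]

-- ===== VERDICT (by name: the statement is the Claim_ definition above) =====
theorem sum_unique_primes_spec : Claim_equal_sum_unique_primes := by
  intro lst _
  show _ = _
  rw [pvA_as_filter_sum, sum_unique_primes_alt]
  simp only []
  rcases hmax : PySem.List.max? (PySem.Set.ofList (lst.filter (fun x => decide (2 ≤ x)))) (fun y => y) with _ | mx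
  · -- no element ≥ 2: A's filtered sum is over the empty list
    rw [PySem.List.max?_eq_none_iff] at hmax
    have : (PySem.Set.ofList lst).filter (fun x => pvGood x) = [] := by
      rw [List.filter_eq_nil_iff]
      intro x hx hg
      have h2 : 2 ≤ x := by
        by_contra h
        rw [pvGood_lt x (by omega)] at hg; simp at hg
      have : x ∈ PySem.Set.ofList (lst.filter (fun x => decide (2 ≤ x))) := by
        rw [PySem.Set.mem_ofList, List.mem_filter]
        have hx' : x ∈ lst := by rw [PySem.Set.mem_ofList] at hx; exact hx
        exact ⟨hx', by simpa⟩
      rw [hmax] at this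
      exact absurd this (List.not_mem_nil)
    rw [this]; rfl
  · have hmx2 : 2 ≤ mx := by
      have hm := PySem.List.max?_mem hmax
      rw [PySem.Set.mem_ofList, List.mem_filter] at hm
      simpa using hm.2
    have hisMax := PySem.List.max?_isMax hmax
    dsimp only
    rw [pvOfList_filter]
    rw [List.filter_filter]
    refine congrArg List.sum (List.filter_congr ?_)
    intro x hx
    by_cases h2 : 2 ≤ x
    · have hxm : x ≤ mx := by
        apply hisMax
        rw [pvOfList_filter, List.mem_filter]
        exact ⟨hx, by simpa⟩
      rw [pvTestB_eq_isPrimeA mx x hmx2 h2 hxm]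
      simp [pvGood, h2, show ¬ x < 2 by omega]
    · rw [pvGood_lt x (by omega)]
      simp [h2]
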